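-- pv_equiv track=rewrite | github.com/Air2air/z-beam-generator | scripts/population/auto_populate_relationships.py | get_typical_context
-- ===== SOURCE A (Python) =====
-- def get_typical_context(contaminant_name):
--     """Infer typical context where contamination occurs"""
--     name_lower = contaminant_name.lower()
--
--     if any(x in name_lower for x in ['marine', 'salt', 'seawater']):
--         return 'Marine environments, coastal installations'
--     elif any(x in name_lower for x in ['industrial', 'manufacturing', 'factory']):
--         return 'Industrial facilities, manufacturing plants'
--     elif any(x in name_lower for x in ['outdoor', 'environmental', 'weather']):
--         return 'Outdoor installations, exposed surfaces'
--     elif any(x in name_lower for x in ['automotive', 'vehicle']):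
--         return 'Automotive applications, transportation'
--     elif any(x in name_lower for x in ['food', 'kitchen', 'commercial']):
--         return 'Food processing, commercial kitchens'
--     else:
--         return 'General industrial and commercial applications'
-- ===== SOURCE B (Python) =====
-- # Priority-scan re-implementation: instead of an ordered if/elif chain of
-- # substring tests, scan the lowered text position by position, checking which
-- # keywords start at each position, and keep the smallest (highest-priority)
-- # category seen; the keyword table's order is irrelevant.
--
-- CONTEXTS = [
--     'Marine environments, coastal installations',
--     'Industrial facilities, manufacturing plants',
--     'Outdoor installations, exposed surfaces',
--     'Automotive applications, transportation',
--     'Food processing, commercial kitchens',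
-- ]
--
-- # (keyword, priority) pairs; listed alphabetically — order does not matter here
-- KEYWORDS = [
--     ('automotive', 3), ('commercial', 4), ('environmental', 2), ('factory', 1),
--     ('food', 4), ('industrial', 1), ('kitchen', 4), ('manufacturing', 1),
--     ('marine', 0), ('outdoor', 2), ('salt', 0), ('seawater', 0),
--     ('vehicle', 3), ('weather', 2),
-- ]
--
-- DEFAULT = 'General industrial and commercial applications'
--
--
-- def get_typical_context(contaminant_name):
--     """Infer typical context where contamination occurs (priority text scan)"""
--     s = contaminant_name.lower()
--     best = 5
--     for i in range(len(s)):
--         for kw, cat in KEYWORDS: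
--             if cat < best and s.startswith(kw, i):
--                 best = cat
--     return CONTEXTS[best] if best < 5 else DEFAULT
-- ===== Notes on version B (the rewrite author's own statement) =====
-- stated objective: alternative
-- what changed: Replaces the ordered if/elif chain of substring tests with a position-by-position scan of the lowered text that checks which keywords start at each index and keeps the smallest (highest-priority) category, so rule order disappears (the keyword table is alphabetical) and the answer is a priority minimum rather than a first-match branch chain.
import Mathlib
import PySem

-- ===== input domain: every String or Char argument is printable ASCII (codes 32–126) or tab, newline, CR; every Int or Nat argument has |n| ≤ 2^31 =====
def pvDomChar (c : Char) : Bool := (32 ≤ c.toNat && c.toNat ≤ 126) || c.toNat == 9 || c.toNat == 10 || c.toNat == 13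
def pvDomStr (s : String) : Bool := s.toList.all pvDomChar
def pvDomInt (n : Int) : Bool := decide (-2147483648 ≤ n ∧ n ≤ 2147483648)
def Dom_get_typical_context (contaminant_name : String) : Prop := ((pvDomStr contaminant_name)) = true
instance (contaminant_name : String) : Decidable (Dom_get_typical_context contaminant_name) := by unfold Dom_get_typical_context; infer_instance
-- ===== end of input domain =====

-- B replaces A's ordered if/elif substring chain by a position-by-position text scan
-- keeping the minimum (highest-priority) matched category; objective: alternative.


-- ===== PORT A =====
def get_typical_context (contaminant_name : String) : String :=
  let name_lower := PySem.Str.lower contaminant_name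
  if ["marine", "salt", "seawater"].any (fun x => PySem.Str.isIn x name_lower) then
    "Marine environments, coastal installations"
  else if ["industrial", "manufacturing", "factory"].any (fun x => PySem.Str.isIn x name_lower) then
    "Industrial facilities, manufacturing plants"
  else if ["outdoor", "environmental", "weather"].any (fun x => PySem.Str.isIn x name_lower) then
    "Outdoor installations, exposed surfaces"
  else if ["automotive", "vehicle"].any (fun x => PySem.Str.isIn x name_lower) then
    "Automotive applications, transportation"
  else if ["food", "kitchen", "commercial"].any (fun x => PySem.Str.isIn x name_lower) then
    "Food processing, commercial kitchens"
  else
    "General industrial and commercial applications"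

-- ===== PORT B =====
def pvCONTEXTS : List String :=
  [ "Marine environments, coastal installations",
    "Industrial facilities, manufacturing plants",
    "Outdoor installations, exposed surfaces",
    "Automotive applications, transportation",
    "Food processing, commercial kitchens" ]

-- (keyword, priority) pairs, alphabetical as in Source B
def pvKEYWORDS : List (List Char × Nat) :=
  [ ("automotive".toList, 3), ("commercial".toList, 4), ("environmental".toList, 2),
    ("factory".toList, 1), ("food".toList, 4), ("industrial".toList, 1),
    ("kitchen".toList, 4), ("manufacturing".toList, 1), ("marine".toList, 0),
    ("outdoor".toList, 2), ("salt".toList, 0), ("seawater".toList, 0),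
    ("vehicle".toList, 3), ("weather".toList, 2) ]

def pvDEFAULT : String := "General industrial and commercial applications"

-- inner `for kw, cat in KEYWORDS` loop at a fixed position i;
-- Python's s.startswith(kw, i) for 0 ≤ i ≤ len(s) is exactly `kw prefixes s[i:]`,
-- ported as PySem.Chars.startswith (cs.drop i) kw
def pvScanPos (cs : List Char) (best : Nat) (i : Nat) : Nat :=
  pvKEYWORDS.foldl
    (fun b p => if p.2 < b ∧ PySem.Chars.startswith (cs.drop i) p.1 = true then p.2 else b)
    best

def get_typical_context_alt (contaminant_name : String) : String :=
  let cs := (PySem.Str.lower contaminant_name).toList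
  let best := (List.range cs.length).foldl (pvScanPos cs) 5
  if best < 5 then pvCONTEXTS.getD best pvDEFAULT else pvDEFAULT

-- ===== PRECONDITION & SPEC =====
def Spec_get_typical_context (contaminant_name : String) (out : String) : Prop := out = get_typical_context_alt contaminant_name
instance (contaminant_name : String) (out : String) : Decidable (Spec_get_typical_context contaminant_name out) := by unfold Spec_get_typical_context; infer_instance

-- ===== CLAIM (what is proved, stated in full; the proofs are below) =====
def Claim_equal_get_typical_context : Prop := ∀ (contaminant_name : String), Dom_get_typical_context contaminant_name → Spec_get_typical_context contaminant_name (get_typical_context contaminant_name)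

-- ===== LEMMAS AND PROOFS =====

-- all priorities matched at position i
def pvMatchedAt (cs : List Char) (i : Nat) : List Nat :=
  pvKEYWORDS.filterMap
    (fun p => if PySem.Chars.startswith (cs.drop i) p.1 = true then some p.2 else none)

def pvL (cs : List Char) : List Nat := (List.range cs.length).flatMap (pvMatchedAt cs)

theorem pv_scanPos_eq_min (cs : List Char) (i : Nat) : ∀ (ks : List (List Char × Nat)) (b : Nat),
    ks.foldl (fun b p => if p.2 < b ∧ PySem.Chars.startswith (cs.drop i) p.1 = true then p.2 else b) b
      = (ks.filterMap (fun p => if PySem.Chars.startswith (cs.drop i) p.1 = true then some p.2 else none)).foldl min b := by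
  intro ks
  induction ks with
  | nil => intro b; rfl
  | cons p ks ih =>
      intro b
      by_cases h : PySem.Chars.startswith (cs.drop i) p.1 = true
      · simp only [List.foldl_cons, List.filterMap_cons, h, if_true, and_true]
        rw [ih]
        congr 1
        split_ifs <;> omega
      · simp only [List.foldl_cons, List.filterMap_cons]
        rw [if_neg (fun hc => h hc.2), if_neg h]
        exact ih b

theorem pv_outer_flat {α : Type} (m : α → List Nat) : ∀ (l : List α) (b : Nat),
    l.foldl (fun b i => (m i).foldl min b) b = (l.flatMap m).foldl min b := by
  intro l
  induction l with
  | nil => intro b; rfl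
  | cons a l ih => intro b; simp [List.foldl_append, ih]

theorem pv_min_le_init : ∀ (l : List Nat) (b : Nat), l.foldl min b ≤ b := by
  intro l
  induction l with
  | nil => intro b; simp
  | cons a l ih => intro b; exact le_trans (ih (min b a)) (by omega)

theorem pv_min_le : ∀ (l : List Nat) (b c : Nat), c ∈ l → l.foldl min b ≤ c := by
  intro l
  induction l with
  | nil => intro b c h; simp at h
  | cons a l ih =>
      intro b c h
      rcases List.mem_cons.mp h with h | h
      · subst h; exact le_trans (pv_min_le_init l (min b c)) (by omega)
      · exact ih (min b a) c h

theorem pv_min_mem : ∀ (l : List Nat) (b : Nat), l.foldl min b = b ∨ l.foldl min b ∈ l := by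
  intro l
  induction l with
  | nil => intro b; left; rfl
  | cons a l ih =>
      intro b
      rcases ih (min b a) with h | h
      · rw [List.foldl_cons, h]
        rcases min_choice b a with h1 | h1
        · left; exact h1
        · right; rw [h1]; exact List.mem_cons_self
      · right; exact List.mem_cons_of_mem a h

theorem pv_best_eq (L : List Nat) (hb : ∀ x ∈ L, x < 5) :
    L.foldl min 5 = (if 0 ∈ L then 0 else if 1 ∈ L then 1 else if 2 ∈ L then 2
      else if 3 ∈ L then 3 else if 4 ∈ L then 4 else 5) := by
  have hmem := pv_min_mem L 5
  split_ifs with h0 h1 h2 h3 h4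
  · have := pv_min_le L 5 0 h0; omega
  · have := pv_min_le L 5 1 h1
    rcases hmem with h | h
    · omega
    · have : L.foldl min 5 ≠ 0 := fun he => h0 (he ▸ h)
      omega
  · have := pv_min_le L 5 2 h2
    rcases hmem with h | h
    · omega
    · have e0 : L.foldl min 5 ≠ 0 := fun he => h0 (he ▸ h)
      have e1 : L.foldl min 5 ≠ 1 := fun he => h1 (he ▸ h)
      omega
  · have := pv_min_le L 5 3 h3
    rcases hmem with h | h
    · omega
    · have e0 : L.foldl min 5 ≠ 0 := fun he => h0 (he ▸ h)
      have e1 : L.foldl min 5 ≠ 1 := fun he => h1 (he ▸ h)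
      have e2 : L.foldl min 5 ≠ 2 := fun he => h2 (he ▸ h)
      omega
  · have := pv_min_le L 5 4 h4
    rcases hmem with h | h
    · omega
    · have e0 : L.foldl min 5 ≠ 0 := fun he => h0 (he ▸ h)
      have e1 : L.foldl min 5 ≠ 1 := fun he => h1 (he ▸ h)
      have e2 : L.foldl min 5 ≠ 2 := fun he => h2 (he ▸ h)
      have e3 : L.foldl min 5 ≠ 3 := fun he => h3 (he ▸ h)
      omega
  · rcases hmem with h | h
    · exact h
    · have hlt := hb _ h
      have e0 : L.foldl min 5 ≠ 0 := fun he => h0 (he ▸ h)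
      have e1 : L.foldl min 5 ≠ 1 := fun he => h1 (he ▸ h)
      have e2 : L.foldl min 5 ≠ 2 := fun he => h2 (he ▸ h)
      have e3 : L.foldl min 5 ≠ 3 := fun he => h3 (he ▸ h)
      have e4 : L.foldl min 5 ≠ 4 := fun he => h4 (he ▸ h)
      omega

theorem pv_exists_startswith (kw cs : List Char) (hk : kw ≠ []) :
    (∃ i, i < cs.length ∧ PySem.Chars.startswith (cs.drop i) kw = true)
      ↔ PySem.Chars.isIn kw cs = true := by
  rw [← PySem.Chars.exists_prefix_drop_iff_isIn]
  constructor
  · rintro ⟨i, _, h⟩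
    exact ⟨i, (PySem.Chars.startswith_iff _ _).mp h⟩
  · rintro ⟨j, h⟩
    by_cases hj : j < cs.length
    · exact ⟨j, hj, (PySem.Chars.startswith_iff _ _).mpr h⟩
    · exfalso
      rw [List.drop_eq_nil_of_le (le_of_not_gt hj)] at h
      exact hk (List.prefix_nil.mp h)

theorem pv_mem_lt (cs : List Char) : ∀ x ∈ pvL cs, x < 5 := by
  intro x h
  simp [pvL, pvMatchedAt, pvKEYWORDS] at h
  rcases h with ⟨a, _, (⟨_,h⟩|⟨_,h⟩|⟨_,h⟩|⟨_,h⟩|⟨_,h⟩|⟨_,h⟩|⟨_,h⟩|⟨_,h⟩|⟨_,h⟩|⟨_,h⟩|⟨_,h⟩|⟨_,h⟩|⟨_,h⟩|⟨_,h⟩)⟩ <;> omega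

theorem pv_mem0 (cs : List Char) : 0 ∈ pvL cs ↔
    (PySem.Chars.isIn "marine".toList cs = true ∨ PySem.Chars.isIn "salt".toList cs = true ∨
     PySem.Chars.isIn "seawater".toList cs = true) := by
  rw [← pv_exists_startswith "marine".toList cs (by decide),
      ← pv_exists_startswith "salt".toList cs (by decide),
      ← pv_exists_startswith "seawater".toList cs (by decide)]
  simp [pvL, pvMatchedAt, pvKEYWORDS, and_or_left, exists_or]

theorem pv_mem1 (cs : List Char) : 1 ∈ pvL cs ↔
    (PySem.Chars.isIn "industrial".toList cs = true ∨ PySem.Chars.isIn "manufacturing".toList cs = true ∨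
     PySem.Chars.isIn "factory".toList cs = true) := by
  rw [← pv_exists_startswith "industrial".toList cs (by decide),
      ← pv_exists_startswith "manufacturing".toList cs (by decide),
      ← pv_exists_startswith "factory".toList cs (by decide)]
  simp [pvL, pvMatchedAt, pvKEYWORDS, and_or_left, exists_or]
  constructor <;> rintro (h | h | h) <;> simp [h]

theorem pv_mem2 (cs : List Char) : 2 ∈ pvL cs ↔
    (PySem.Chars.isIn "outdoor".toList cs = true ∨ PySem.Chars.isIn "environmental".toList cs = true ∨
     PySem.Chars.isIn "weather".toList cs = true) := by
  rw [← pv_exists_startswith "outdoor".toList cs (by decide),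
      ← pv_exists_startswith "environmental".toList cs (by decide),
      ← pv_exists_startswith "weather".toList cs (by decide)]
  simp [pvL, pvMatchedAt, pvKEYWORDS, and_or_left, exists_or]
  constructor <;> rintro (h | h | h) <;> simp [h]

theorem pv_mem3 (cs : List Char) : 3 ∈ pvL cs ↔
    (PySem.Chars.isIn "automotive".toList cs = true ∨ PySem.Chars.isIn "vehicle".toList cs = true) := by
  rw [← pv_exists_startswith "automotive".toList cs (by decide),
      ← pv_exists_startswith "vehicle".toList cs (by decide)]
  simp [pvL, pvMatchedAt, pvKEYWORDS, and_or_left, exists_or]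

theorem pv_mem4 (cs : List Char) : 4 ∈ pvL cs ↔
    (PySem.Chars.isIn "food".toList cs = true ∨ PySem.Chars.isIn "kitchen".toList cs = true ∨
     PySem.Chars.isIn "commercial".toList cs = true) := by
  rw [← pv_exists_startswith "food".toList cs (by decide),
      ← pv_exists_startswith "kitchen".toList cs (by decide),
      ← pv_exists_startswith "commercial".toList cs (by decide)]
  simp [pvL, pvMatchedAt, pvKEYWORDS, and_or_left, exists_or]
  constructor <;> rintro (h | h | h) <;> simp [h]

theorem pv_chain (cs : List Char) :
    (if (List.range cs.length).foldl (pvScanPos cs) 5 < 5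
       then pvCONTEXTS.getD ((List.range cs.length).foldl (pvScanPos cs) 5) pvDEFAULT
       else pvDEFAULT)
    = (if (PySem.Chars.isIn "marine".toList cs = true ∨ PySem.Chars.isIn "salt".toList cs = true ∨
           PySem.Chars.isIn "seawater".toList cs = true) then "Marine environments, coastal installations"
       else if (PySem.Chars.isIn "industrial".toList cs = true ∨ PySem.Chars.isIn "manufacturing".toList cs = true ∨
           PySem.Chars.isIn "factory".toList cs = true) then "Industrial facilities, manufacturing plants"
       else if (PySem.Chars.isIn "outdoor".toList cs = true ∨ PySem.Chars.isIn "environmental".toList cs = true ∨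
           PySem.Chars.isIn "weather".toList cs = true) then "Outdoor installations, exposed surfaces"
       else if (PySem.Chars.isIn "automotive".toList cs = true ∨ PySem.Chars.isIn "vehicle".toList cs = true)
           then "Automotive applications, transportation"
       else if (PySem.Chars.isIn "food".toList cs = true ∨ PySem.Chars.isIn "kitchen".toList cs = true ∨
           PySem.Chars.isIn "commercial".toList cs = true) then "Food processing, commercial kitchens"
       else "General industrial and commercial applications") := by
  have hscan : pvScanPos cs = fun b i => (pvMatchedAt cs i).foldl min b := by
    funext b i
    exact pv_scanPos_eq_min cs i pvKEYWORDS b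
  rw [hscan, pv_outer_flat (pvMatchedAt cs) (List.range cs.length) 5,
      show (List.range cs.length).flatMap (pvMatchedAt cs) = pvL cs from rfl,
      pv_best_eq (pvL cs) (pv_mem_lt cs)]
  simp only [pv_mem0, pv_mem1, pv_mem2, pv_mem3, pv_mem4]
  split_ifs <;> simp [pvCONTEXTS, pvDEFAULT] <;> omega

-- ===== VERDICT (by name: the statement is the Claim_ definition above) =====
theorem get_typical_context_spec : Claim_equal_get_typical_context := by
  intro s _
  unfold Spec_get_typical_context get_typical_context get_typical_context_alt
  have h := pv_chain ((PySem.Str.lower s).toList)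
  simp only [List.any_cons, List.any_nil, Bool.or_eq_true,    PySem.Str.isIn_eq, PySem.Str.toList_lower] at h ⊢
  simpa using h.symm
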